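-- pv_equiv track=rewrite | github.com/ARMmbed/yotta | yotta/lib/utils.py | islast
-- ===== SOURCE A (Python) =====
-- def islast(generator):
--     ''' indicate whether the current item is the last one in a generator
--     '''
--     next_x = None
--     first = True
--     for x in generator:
--         if not first:
--             yield (next_x, False)
--         next_x = x
--         first = False
--     if not first:
--         yield (next_x, True)
-- ===== SOURCE B (Python) =====
-- def islast(generator):
--     ''' indicate whether the current item is the last one in a generator
--     '''
--     items = list(generator)
--     last = len(items) - 1
--     for i, x in enumerate(items):
--         yield (x, i == last)
-- ===== Notes on version B (the rewrite author's own statement) =====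
-- stated objective: alternative
-- what changed: B materialises the generator into a list and marks each item by comparing its index with len-1 (two staged passes), instead of A's single-pass one-element lookahead with a first-flag.
import Mathlib
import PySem

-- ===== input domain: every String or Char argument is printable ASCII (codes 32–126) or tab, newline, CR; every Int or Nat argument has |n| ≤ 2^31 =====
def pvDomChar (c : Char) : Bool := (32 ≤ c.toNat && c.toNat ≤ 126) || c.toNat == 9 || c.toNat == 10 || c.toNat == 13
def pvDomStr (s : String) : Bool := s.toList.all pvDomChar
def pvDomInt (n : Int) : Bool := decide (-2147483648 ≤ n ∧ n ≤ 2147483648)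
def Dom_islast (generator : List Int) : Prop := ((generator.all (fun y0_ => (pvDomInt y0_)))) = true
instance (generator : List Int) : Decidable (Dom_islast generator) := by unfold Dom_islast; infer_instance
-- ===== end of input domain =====

-- B materialises the input and flags each item by index == len-1, replacing A's lookahead with a first-flag (alternative decomposition, same cost).

-- ===== PORT A =====
-- A's loop state: (next_x, first, items yielded so far); yields become list appends.
def islast (generator : List Int) : List (Int × Bool) :=
  let s := generator.foldl
    (fun (s : Option Int × Bool × List (Int × Bool)) x =>
      let (next_x, first, acc) := s
      let acc := if !first then acc ++ [(next_x.getD 0, false)] else acc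
      (some x, false, acc))
    (none, true, [])
  let (next_x, first, acc) := s
  if !first then acc ++ [(next_x.getD 0, true)] else acc

-- ===== PORT B =====
-- Source B: items = list(generator); last = len(items)-1; for i,x in enumerate(items): yield (x, i == last)
def islast_alt (generator : List Int) : List (Int × Bool) :=
  let items := generator
  let last : Int := (items.length : Int) - 1
  items.zipIdx.map (fun p => (p.1, decide ((p.2 : Int) = last)))

-- ===== PRECONDITION & SPEC =====
def Spec_islast (generator : List Int) (out : List (Int × Bool)) : Prop := out = islast_alt generator
instance (generator : List Int) (out : List (Int × Bool)) : Decidable (Spec_islast generator out) := by unfold Spec_islast; infer_instance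

-- ===== CLAIM (what is proved, stated in full; the proofs are below) =====
def Claim_equal_islast : Prop := ∀ (generator : List Int), Dom_islast generator → Spec_islast generator (islast generator)

-- ===== LEMMAS AND PROOFS =====
-- proof-side description of A's tail behaviour once the first element is consumed
def islastLoopSpec (prev : Int) : List Int → List (Int × Bool)
  | [] => [(prev, true)]
  | x :: xs => (prev, false) :: islastLoopSpec x xs

-- invariant: after the first element, A's fold produces acc ++ islastLoopSpec prev xs
theorem islast_foldl_inv (xs : List Int) (prev : Int) (acc : List (Int × Bool)) :
    (let s := xs.foldl
        (fun (s : Option Int × Bool × List (Int × Bool)) x =>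
          let (next_x, first, acc) := s
          let acc := if !first then acc ++ [(next_x.getD 0, false)] else acc
          (some x, false, acc))
        (some prev, false, acc)
      let (next_x, first, acc) := s
      if !first then acc ++ [(next_x.getD 0, true)] else acc)
    = acc ++ islastLoopSpec prev xs := by
  induction xs generalizing prev acc with
  | nil => simp [islastLoopSpec]
  | cons x xs ih =>
    simp only [List.foldl_cons]
    have h := ih x (acc ++ [(prev, false)])
    simp only [islastLoopSpec] at h ⊢
    simpa [List.append_assoc] using h

-- B's indexed map over prev :: xs (starting at index k, with n the last index) equals the same loop spec
theorem islast_alt_loopSpec (xs : List Int) (prev : Int) (k : Nat) (n : Int)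
    (h : n = (k : Int) + xs.length) :
    ((prev :: xs).zipIdx k).map (fun p => (p.1, decide ((p.2 : Int) = n)))
      = islastLoopSpec prev xs := by
  induction xs generalizing prev k n with
  | nil =>
    simp [islastLoopSpec, List.zipIdx] at h ⊢
    omega
  | cons x xs ih =>
    simp only [List.length_cons] at h
    have hk : ¬ ((k : Int) = n) := by push_cast at h; omega
    simp only [List.zipIdx_cons, List.map_cons, islastLoopSpec]
    have h2 := ih x (k + 1) n (by push_cast at h ⊢; omega)
    simp only [List.zipIdx_cons, List.map_cons] at h2
    push_cast at h2
    simp [hk, h2]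

-- ===== VERDICT (by name: the statement is the Claim_ definition above) =====
theorem islast_spec : Claim_equal_islast := by
  intro generator _
  unfold Spec_islast islast islast_alt
  cases generator with
  | nil => simp
  | cons x xs =>
    simp only [List.foldl_cons]
    have hA := islast_foldl_inv xs x []
    have hB := islast_alt_loopSpec xs x 0 (((xs.length + 1 : Nat) : Int) - 1) (by push_cast; ring)
    simp only [List.length_cons]
    exact Eq.trans (by simpa using hA) hB.symm
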